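-- pv_equiv track=rewrite | github.com/ara818/django-autocompleter | autocompleter/utils.py | get_phrase_indices_for_term
-- ===== SOURCE A (Python) =====
-- def get_phrase_indices_for_term(term):
--     """
--     For an term, return of index of every phrase in the term to it's
--     word position (start word number, end word number,) within the term.
--
--     Note: if a phrase appears twice in a term, then the very last position
--     will be recorded. For our purposes, this works because other occurences
--     will be handled when this function is called recursively
--     """
--     words = term.split()
--     num_words = len(words)
--     phrase_map = {}
--     for i in range(0, num_words):
--         for j in range(1, num_words + 1):
--             if i >= j:
--                 continue
--             phrase = " ".join(words[i:j])
--             phrase_map[phrase] = (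
--                 i,
--                 j,
--             )
--     return phrase_map
-- ===== SOURCE B (Python) =====
-- def get_phrase_indices_for_term(term):
--     """
--     Same phrase -> (start word, end word) map as the original, but built by
--     consuming the word list suffix by suffix while growing each phrase with a
--     string accumulator, instead of index ranges with a skip guard and a fresh
--     slice-and-space-join for every (i, j) cell.
--     """
--     phrase_map = {}
--     suffix = term.split()
--     i = 0
--     while suffix:
--         rest = suffix[1:]
--         j = i + 1
--         phrase = suffix[0]
--         phrase_map[phrase] = (i, j)
--         for w in rest:
--             j += 1
--             phrase = phrase + " " + w
--             phrase_map[phrase] = (i, j)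
--         i += 1
--         suffix = rest
--     return phrase_map
-- ===== Notes on version B (the rewrite author's own statement) =====
-- stated objective: alternative
-- what changed: Replaces the nested index ranges with a skip guard and a fresh slice-and-space-join per (i, j) cell by a suffix-consuming loop that maintains each growing phrase in a string accumulator, extending it one word per step.
import Mathlib
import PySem

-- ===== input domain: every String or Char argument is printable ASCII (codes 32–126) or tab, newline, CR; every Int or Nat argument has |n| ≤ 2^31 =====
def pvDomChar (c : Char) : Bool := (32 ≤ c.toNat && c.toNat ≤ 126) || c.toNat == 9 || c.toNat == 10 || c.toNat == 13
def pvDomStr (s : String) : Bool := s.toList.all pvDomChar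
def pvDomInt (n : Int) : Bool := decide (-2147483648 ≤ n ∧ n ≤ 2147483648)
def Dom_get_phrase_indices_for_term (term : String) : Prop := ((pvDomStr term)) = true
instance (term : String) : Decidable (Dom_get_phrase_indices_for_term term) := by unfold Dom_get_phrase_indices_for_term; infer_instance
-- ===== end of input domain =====

-- B replaces the nested index ranges + per-cell slice-and-join with a suffix-consuming
-- loop that grows each phrase in a string accumulator (alternative decomposition; return value only).

-- ===== PORT A =====
def get_phrase_indices_for_term (term : String) : List (String × Int × Int) :=
  let words := PySem.Str.split₀ term
  let num_words : Int := words.length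
  let phrase_map : PySem.Dict String (Int × Int) :=
    (PySem.List.pyRange 0 num_words 1).foldl (fun pm i =>
      (PySem.List.pyRange 1 (num_words + 1) 1).foldl (fun pm j =>
        if i ≥ j then pm
        else pm.insert (PySem.Str.join " " (PySem.List.slice words (some i) (some j))) (i, j)) pm)
      PySem.Dict.empty
  phrase_map.items

-- ===== PORT B =====
-- inner 'for w in rest' loop of Source B, carrying the loop state (j, phrase, phrase_map)
def pvInnerLoop (i j : Int) (phrase : String) (pm : PySem.Dict String (Int × Int)) :
    List String → PySem.Dict String (Int × Int)
  | [] => pm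
  | w :: ws =>
    pvInnerLoop i (j + 1) (phrase ++ " " ++ w)
      (pm.insert (phrase ++ " " ++ w) (i, j + 1)) ws

-- outer 'while suffix' loop of Source B, consuming the word list suffix by suffix
def pvOuterLoop (pm : PySem.Dict String (Int × Int)) (i : Int) :
    List String → PySem.Dict String (Int × Int)
  | [] => pm
  | w :: rest => pvOuterLoop (pvInnerLoop i (i + 1) w (pm.insert w (i, i + 1)) rest) (i + 1) rest

def get_phrase_indices_for_term_alt (term : String) : List (String × Int × Int) :=
  (pvOuterLoop PySem.Dict.empty 0 (PySem.Str.split₀ term)).items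

-- ===== PRECONDITION & SPEC =====
def Spec_get_phrase_indices_for_term (term : String) (out : List (String × Int × Int)) : Prop := out = get_phrase_indices_for_term_alt term
instance (term : String) (out : List (String × Int × Int)) : Decidable (Spec_get_phrase_indices_for_term term out) := by unfold Spec_get_phrase_indices_for_term; infer_instance

-- ===== CLAIM (what is proved, stated in full; the proofs are below) =====
def Claim_equal_get_phrase_indices_for_term : Prop := ∀ (term : String), Dom_get_phrase_indices_for_term term → Spec_get_phrase_indices_for_term term (get_phrase_indices_for_term term)

-- ===== LEMMAS AND PROOFS =====

theorem pv_intercalate_cc (s a c : List Char) (u : List (List Char)) :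
    List.intercalate s (a :: c :: u) = a ++ s ++ List.intercalate s (c :: u) := by
  simp [List.intercalate, List.intersperse]

theorem pv_intercalate_snoc (s : List Char) (as : List (List Char)) (b : List Char) (h : as ≠ []) :
    List.intercalate s (as ++ [b]) = List.intercalate s as ++ s ++ b := by
  induction as with
  | nil => simp at h
  | cons a t ih =>
    cases t with
    | nil => simp [List.intercalate, List.intersperse]
    | cons c u =>
      have h2 := ih (by simp)
      simp only [List.cons_append] at h2 ⊢
      rw [pv_intercalate_cc, pv_intercalate_cc, h2]
      simp

theorem pv_join_singleton (x : String) : PySem.Str.join " " [x] = x := by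
  simp [PySem.Str.join, PySem.Chars.join, List.intercalate]

theorem pv_join_snoc (ys : List String) (w : String) (h : ys ≠ []) :
    PySem.Str.join " " (ys ++ [w]) = PySem.Str.join " " ys ++ " " ++ w := by
  simp only [PySem.Str.join, List.map_append, List.map_cons, List.map_nil, PySem.Chars.join]
  rw [pv_intercalate_snoc _ _ _ (by simpa using h)]
  rw [String.ofList_append, String.ofList_append, String.ofList_toList, String.ofList_toList]

theorem pv_slice_succ (words : List String) (i j : Nat) (hij : i ≤ j) (hj : j < words.length) :
    PySem.List.slice words (some (i : Int)) (some ((j : Int) + 1))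
      = PySem.List.slice words (some (i : Int)) (some (j : Int)) ++ [words[j]] := by
  have : ((j : Int) + 1) = ((j + 1 : Nat) : Int) := by push_cast; ring
  rw [this, PySem.List.slice_natCast, PySem.List.slice_natCast]
  have h1 : j + 1 - i = (j - i) + 1 := by omega
  rw [h1, List.take_add_one]
  have h2 : (words.drop i)[j - i]? = some words[j] := by
    rw [List.getElem?_drop]
    have : i + (j - i) = j := by omega
    rw [this, List.getElem?_eq_getElem hj]
  simp [h2]

theorem pv_slice_one (words : List String) (i : Nat) (hi : i < words.length) :
    PySem.List.slice words (some (i : Int)) (some ((i : Int) + 1)) = [words[i]] := by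
  have h := pv_slice_succ words i i le_rfl hi
  rw [h, PySem.List.slice_natCast]
  simp

theorem pv_slice_ne_nil (words : List String) (i j : Nat) (hij : i < j) (hj : j ≤ words.length) :
    PySem.List.slice words (some (i : Int)) (some (j : Int)) ≠ [] := by
  rw [PySem.List.slice_natCast]
  intro hcon
  have := congrArg List.length hcon
  simp [List.length_take, List.length_drop] at this
  omega

theorem pv_phrase_succ (words : List String) (i j : Nat) (hij : i < j) (hj : j < words.length) :
    PySem.Str.join " " (PySem.List.slice words (some (i : Int)) (some ((j : Int) + 1)))
      = PySem.Str.join " " (PySem.List.slice words (some (i : Int)) (some (j : Int))) ++ " " ++ words[j] := by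
  rw [pv_slice_succ words i j (le_of_lt hij) hj,
      pv_join_snoc _ _ (pv_slice_ne_nil words i j hij (le_of_lt hj))]

theorem pv_inner_eq (words : List String) (rs : List String) :
    ∀ (i j : Nat) (pm : PySem.Dict String (Int × Int)),
      i < j → words.drop j = rs → j ≤ words.length →
      pvInnerLoop (i : Int) (j : Int)
          (PySem.Str.join " " (PySem.List.slice words (some (i : Int)) (some (j : Int)))) pm rs
        = (PySem.List.pyRange ((j : Int) + 1) ((words.length : Int) + 1) 1).foldl
            (fun pm' jj =>
              pm'.insert (PySem.Str.join " " (PySem.List.slice words (some (i : Int)) (some jj)))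
                ((i : Int), jj)) pm := by
  induction rs with
  | nil =>
    intro i j pm hij hdrop hjn
    have hn : j = words.length := by
      have := List.drop_eq_nil_iff.mp hdrop
      omega
    subst hn
    rw [PySem.List.pyRange_one_eq_nil (by omega)]
    simp [pvInnerLoop]
  | cons w ws ih =>
    intro i j pm hij hdrop hjn
    have hjlt : j < words.length := by
      by_contra hc
      rw [List.drop_eq_nil_iff.mpr (by omega)] at hdrop
      exact (List.cons_ne_nil w ws) hdrop.symm
    have hw : words[j] = w := by
      have h0 : (words.drop j)[0]? = some w := by rw [hdrop]; rfl
      rw [List.getElem?_drop] at h0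
      simpa [List.getElem?_eq_getElem hjlt] using h0
    have hdrop' : words.drop (j + 1) = ws := by
      have ht : words.drop (j + 1) = (words.drop j).tail := by
        rw [List.tail_drop]
      rw [ht, hdrop]; rfl
    have hcast : ((j : Int) + 1) = ((j + 1 : Nat) : Int) := by push_cast; ring
    have hstep : pvInnerLoop (i : Int) (j : Int)
        (PySem.Str.join " " (PySem.List.slice words (some (i : Int)) (some (j : Int)))) pm (w :: ws)
      = pvInnerLoop (i : Int) ((j : Int) + 1)
          (PySem.Str.join " " (PySem.List.slice words (some (i : Int)) (some (j : Int))) ++ " " ++ w)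
          (pm.insert
            (PySem.Str.join " " (PySem.List.slice words (some (i : Int)) (some (j : Int))) ++ " " ++ w)
            ((i : Int), (j : Int) + 1)) ws := rfl
    rw [hstep, ← hw, ← pv_phrase_succ words i j hij hjlt,
        PySem.List.pyRange_one_cons (by omega)]
    simp only [List.foldl_cons]
    rw [hcast]
    exact ih i (j + 1) _ (by omega) hdrop' (by omega)

theorem pv_outer_eq (words : List String) (suffix : List String) :
    ∀ (i : Nat) (pm : PySem.Dict String (Int × Int)),
      words.drop i = suffix →
      pvOuterLoop pm (i : Int) suffix
        = (PySem.List.pyRange (i : Int) (words.length : Int) 1).foldl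
            (fun pm' ii =>
              (PySem.List.pyRange (ii + 1) ((words.length : Int) + 1) 1).foldl
                (fun pm'' jj =>
                  pm''.insert (PySem.Str.join " " (PySem.List.slice words (some ii) (some jj)))
                    (ii, jj)) pm') pm := by
  induction suffix with
  | nil =>
    intro i pm hdrop
    have : words.length ≤ i := by
      have := List.drop_eq_nil_iff.mp hdrop
      omega
    rw [PySem.List.pyRange_one_eq_nil (by omega)]
    simp [pvOuterLoop]
  | cons w rest ih =>
    intro i pm hdrop
    have hilt : i < words.length := by
      by_contra hc
      rw [List.drop_eq_nil_iff.mpr (by omega)] at hdrop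
      exact (List.cons_ne_nil w rest) hdrop.symm
    have hw : words[i] = w := by
      have h0 : (words.drop i)[0]? = some w := by rw [hdrop]; rfl
      rw [List.getElem?_drop] at h0
      simpa [List.getElem?_eq_getElem hilt] using h0
    have hdrop' : words.drop (i + 1) = rest := by
      have ht : words.drop (i + 1) = (words.drop i).tail := by
        rw [List.tail_drop]
      rw [ht, hdrop]; rfl
    have hcast : ((i + 1 : Nat) : Int) = (i : Int) + 1 := by push_cast; ring
    have hwj : w = PySem.Str.join " " (PySem.List.slice words (some (i : Int)) (some ((i : Int) + 1))) := by
      rw [pv_slice_one words i hilt, pv_join_singleton, hw]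
    have hstep : pvOuterLoop pm (i : Int) (w :: rest)
        = pvOuterLoop (pvInnerLoop (i : Int) ((i : Int) + 1) w
            (pm.insert w ((i : Int), (i : Int) + 1)) rest) ((i : Int) + 1) rest := rfl
    have hinner := pv_inner_eq words rest i (i + 1)
      (pm.insert (PySem.Str.join " " (PySem.List.slice words (some (i : Int)) (some ((i : Int) + 1))))
        ((i : Int), (i : Int) + 1)) (by omega) hdrop' (by omega)
    rw [hcast] at hinner
    rw [hstep, hwj, hinner,
        PySem.List.pyRange_one_cons (a := (i : Int)) (by omega)]
    simp only [List.foldl_cons]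
    rw [PySem.List.pyRange_one_cons (a := (i : Int) + 1) (by omega)]
    simp only [List.foldl_cons]
    have ihh := ih (i + 1)
      ((PySem.List.pyRange ((i : Int) + 1 + 1) ((words.length : Int) + 1) 1).foldl
        (fun pm' jj =>
          pm'.insert (PySem.Str.join " " (PySem.List.slice words (some (i : Int)) (some jj)))
            ((i : Int), jj))
        (pm.insert (PySem.Str.join " " (PySem.List.slice words (some (i : Int)) (some ((i : Int) + 1))))
          ((i : Int), (i : Int) + 1))) hdrop'
    rw [hcast] at ihh
    rw [ihh]

theorem pv_foldl_skip (i : Int) (g : PySem.Dict String (Int × Int) → Int → PySem.Dict String (Int × Int))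
    (l : List Int) : ∀ (pm : PySem.Dict String (Int × Int)), (∀ j ∈ l, j ≤ i) →
    l.foldl (fun pm j => if i ≥ j then pm else g pm j) pm = pm := by
  induction l with
  | nil => intro pm _; rfl
  | cons x xs ih =>
    intro pm h
    simp only [List.foldl_cons]
    rw [if_pos (h x (by simp))]
    exact ih pm (fun j hj => h j (by simp [hj]))

theorem pv_skip_eq (words : List String) (i : Int) (h0 : 0 ≤ i) (h1 : i < (words.length : Int))
    (pm : PySem.Dict String (Int × Int)) :
    (PySem.List.pyRange 1 ((words.length : Int) + 1) 1).foldl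
      (fun pm' j => if i ≥ j then pm'
        else pm'.insert (PySem.Str.join " " (PySem.List.slice words (some i) (some j))) (i, j)) pm
    = (PySem.List.pyRange (i + 1) ((words.length : Int) + 1) 1).foldl
        (fun pm' j =>
          pm'.insert (PySem.Str.join " " (PySem.List.slice words (some i) (some j))) (i, j)) pm := by
  rw [PySem.List.pyRange_one_append 1 (i + 1) ((words.length : Int) + 1) (by omega) (by omega)]
  rw [List.foldl_append]
  rw [pv_foldl_skip i _ _ pm
    (fun j hj => by have := PySem.List.mem_pyRange_one.mp hj; omega)]
  apply PySem.List.foldl_congr_mem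
  intro acc x hx
  have hm := PySem.List.mem_pyRange_one.mp hx
  rw [if_neg (by omega)]

-- ===== VERDICT (by name: the statement is the Claim_ definition above) =====
theorem get_phrase_indices_for_term_spec : Claim_equal_get_phrase_indices_for_term := by
  intro term _
  unfold Spec_get_phrase_indices_for_term
  simp only [get_phrase_indices_for_term, get_phrase_indices_for_term_alt]
  congr 1
  have houter := pv_outer_eq (PySem.Str.split₀ term) (PySem.Str.split₀ term) 0 PySem.Dict.empty
    (by simp)
  simp only [Nat.cast_zero] at houter
  rw [houter]
  apply PySem.List.foldl_congr_mem
  intro acc x hx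
  have hmem := PySem.List.mem_pyRange_one.mp hx
  exact pv_skip_eq (PySem.Str.split₀ term) x hmem.1 hmem.2 acc
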